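-- pv_equiv track=rewrite | github.com/theMessiMagic/if-fashion | app.py | is_valid_aadhaar
-- ===== SOURCE A (Python) =====
-- def clean_aadhaar(aadhaar_raw):
--     return "".join(ch for ch in (aadhaar_raw or "") if ch.isdigit())
--
-- def is_valid_aadhaar(aadhaar_raw):
--     num = clean_aadhaar(aadhaar_raw)
--     if len(num) != 12:
--         return False
--
--     # Verhoeff checksum validation.
--     d_table = [
--         [0, 1, 2, 3, 4, 5, 6, 7, 8, 9],
--         [1, 2, 3, 4, 0, 6, 7, 8, 9, 5],
--         [2, 3, 4, 0, 1, 7, 8, 9, 5, 6],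
--         [3, 4, 0, 1, 2, 8, 9, 5, 6, 7],
--         [4, 0, 1, 2, 3, 9, 5, 6, 7, 8],
--         [5, 9, 8, 7, 6, 0, 4, 3, 2, 1],
--         [6, 5, 9, 8, 7, 1, 0, 4, 3, 2],
--         [7, 6, 5, 9, 8, 2, 1, 0, 4, 3],
--         [8, 7, 6, 5, 9, 3, 2, 1, 0, 4],
--         [9, 8, 7, 6, 5, 4, 3, 2, 1, 0],
--     ]
--     p_table = [
--         [0, 1, 2, 3, 4, 5, 6, 7, 8, 9],
--         [1, 5, 7, 6, 2, 8, 3, 0, 9, 4],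
--         [5, 8, 0, 3, 7, 9, 6, 1, 4, 2],
--         [8, 9, 1, 6, 0, 4, 3, 5, 2, 7],
--         [9, 4, 5, 3, 1, 2, 6, 8, 7, 0],
--         [4, 2, 8, 6, 5, 7, 3, 9, 0, 1],
--         [2, 7, 9, 3, 8, 0, 6, 4, 1, 5],
--         [7, 0, 4, 6, 9, 1, 3, 2, 5, 8],
--     ]
--     c = 0
--     for i, item in enumerate(reversed(num)):
--         c = d_table[c][p_table[i % 8][int(item)]]
--     return c == 0
-- ===== SOURCE B (Python) =====
-- def clean_aadhaar(aadhaar_raw):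
--     return "".join(ch for ch in (aadhaar_raw or "") if ch.isdigit())
--
-- def _verhoeff_rows():
--     # rows[j][v] = p^j(v) decoded into D5 coordinates (is_reflection, rotation),
--     # computed once by iterating the base permutation (no hard-coded p_table).
--     base = [1, 5, 7, 6, 2, 8, 3, 0, 9, 4]
--     rows, perm = [], list(range(10))
--     for _ in range(8):
--         rows.append([(e >= 5, e % 5) for e in perm])
--         perm = [base[v] for v in perm]
--     return rows
--
-- _ROWS = _verhoeff_rows()
--
-- def is_valid_aadhaar(aadhaar_raw):
--     num = clean_aadhaar(aadhaar_raw)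
--     if len(num) != 12:
--         return False
--     # Verhoeff in D5 coordinates: scan FORWARD, left-multiplying the running
--     # product, tracked as a reflection parity plus a rotation exponent mod 5;
--     # no d-table and no group-multiplication routine is needed.
--     refl, rot = False, 0
--     for i, ch in enumerate(num):
--         is_refl, t = _ROWS[(11 - i) % 8][int(ch)]
--         if is_refl:
--             refl = not refl
--             rot = (t - rot) % 5
--         else:
--             rot = (t + rot) % 5
--     return (not refl) and rot == 0
-- ===== Notes on version B (the rewrite author's own statement) =====
-- stated objective: alternative
-- what changed: B scans the digits forward (not reversed) left-multiplying the running Verhoeff product, tracked not as a digit c with a d-table/group-multiplication step but as two scalar accumulators (reflection parity, rotation exponent mod 5) in D5 coordinates, with the permutation rows precomputed once from the base permutation instead of hard-coded.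
import Mathlib
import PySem

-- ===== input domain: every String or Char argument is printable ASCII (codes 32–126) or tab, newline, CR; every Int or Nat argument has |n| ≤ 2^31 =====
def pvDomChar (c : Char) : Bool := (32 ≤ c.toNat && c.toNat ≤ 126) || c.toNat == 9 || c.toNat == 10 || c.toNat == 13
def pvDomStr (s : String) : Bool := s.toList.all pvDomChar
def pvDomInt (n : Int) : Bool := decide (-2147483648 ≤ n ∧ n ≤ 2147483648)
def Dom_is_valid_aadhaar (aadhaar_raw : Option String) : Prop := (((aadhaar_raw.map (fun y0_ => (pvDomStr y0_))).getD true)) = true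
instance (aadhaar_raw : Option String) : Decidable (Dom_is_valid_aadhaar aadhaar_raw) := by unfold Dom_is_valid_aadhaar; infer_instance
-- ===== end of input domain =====

-- B replaces A's reversed scan with d-table lookups by a forward scan that left-multiplies the
-- running Verhoeff product kept in D5 coordinates (reflection parity + rotation mod 5), with the
-- permutation rows computed once from the base permutation; alternative algorithm, same O(n) cost.


-- ===== PORT A =====
-- clean_aadhaar: "".join(ch for ch in (aadhaar_raw or "") if ch.isdigit())  (shared helper of A and B)
def clean_aadhaar (aadhaar_raw : Option String) : String :=
  String.ofList (((aadhaar_raw.getD "").toList).filter PySem.Chars.isdigit)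

def pvDTable : List (List Nat) := [
  [0, 1, 2, 3, 4, 5, 6, 7, 8, 9],
  [1, 2, 3, 4, 0, 6, 7, 8, 9, 5],
  [2, 3, 4, 0, 1, 7, 8, 9, 5, 6],
  [3, 4, 0, 1, 2, 8, 9, 5, 6, 7],
  [4, 0, 1, 2, 3, 9, 5, 6, 7, 8],
  [5, 9, 8, 7, 6, 0, 4, 3, 2, 1],
  [6, 5, 9, 8, 7, 1, 0, 4, 3, 2],
  [7, 6, 5, 9, 8, 2, 1, 0, 4, 3],
  [8, 7, 6, 5, 9, 3, 2, 1, 0, 4],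
  [9, 8, 7, 6, 5, 4, 3, 2, 1, 0]]
def pvPTable : List (List Nat) := [
  [0, 1, 2, 3, 4, 5, 6, 7, 8, 9],
  [1, 5, 7, 6, 2, 8, 3, 0, 9, 4],
  [5, 8, 0, 3, 7, 9, 6, 1, 4, 2],
  [8, 9, 1, 6, 0, 4, 3, 5, 2, 7],
  [9, 4, 5, 3, 1, 2, 6, 8, 7, 0],
  [4, 2, 8, 6, 5, 7, 3, 9, 0, 1],
  [2, 7, 9, 3, 8, 0, 6, 4, 1, 5],
  [7, 0, 4, 6, 9, 1, 3, 2, 5, 8]]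

-- loop body of A: c = d_table[c][p_table[i % 8][int(item)]].
-- int(item) is ported as item.toNat - 48: item is a single ASCII digit by construction of num
-- (the filter keeps exactly '0'..'9'), where int() returns exactly this value.
-- All list indices are in range, so getD's defaults are never used.
def pvStepA (c : Nat) (p : Int × Char) : Nat :=
  (pvDTable.getD c []).getD ((pvPTable.getD ((PySem.Int.mod p.1 8).toNat) []).getD (p.2.toNat - 48) 0) 0

def is_valid_aadhaar (aadhaar_raw : Option String) : Bool :=
  let num := clean_aadhaar aadhaar_raw
  if num.toList.length ≠ 12 then false
  else decide (((PySem.List.enumerate num.toList.reverse 0).foldl pvStepA 0) = 0)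

-- ===== PORT B =====
def pvBase : List Nat := [1, 5, 7, 6, 2, 8, 3, 0, 9, 4]

-- _verhoeff_rows(): rows[j][v] = p^j(v) decoded as (is_reflection, rotation), built by
-- iterating the base permutation 8 times (rows.append + perm = [base[v] for v in perm]).
def pvRows : List (List (Bool × Nat)) :=
  ((List.range 8).foldl
    (fun st _ =>
      (st.1 ++ [st.2.map (fun e => (decide (5 ≤ e), e % 5))],
       st.2.map (fun v => pvBase.getD v 0)))
    ([], List.range 10)).1

-- loop body of B: decode _ROWS[(11-i) % 8][int(ch)] and update (refl, rot);
-- Python's % on a possibly negative t - rot is PySem.Int.mod (exact).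
def pvBStep (st : Bool × Int) (p : Int × Char) : Bool × Int :=
  let e := (pvRows.getD ((PySem.Int.mod (11 - p.1) 8).toNat) []).getD (p.2.toNat - 48) (false, 0)
  if e.1 then (!st.1, PySem.Int.mod ((e.2 : Int) - st.2) 5)
  else (st.1, PySem.Int.mod ((e.2 : Int) + st.2) 5)

def is_valid_aadhaar_alt (aadhaar_raw : Option String) : Bool :=
  let num := clean_aadhaar aadhaar_raw
  if num.toList.length ≠ 12 then false
  else
    let r := (PySem.List.enumerate num.toList 0).foldl pvBStep (false, 0)
    !r.1 && decide (r.2 = 0)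

-- ===== PRECONDITION & SPEC =====
def Spec_is_valid_aadhaar (aadhaar_raw : Option String) (out : Bool) : Prop := out = is_valid_aadhaar_alt aadhaar_raw
instance (aadhaar_raw : Option String) (out : Bool) : Decidable (Spec_is_valid_aadhaar aadhaar_raw out) := by unfold Spec_is_valid_aadhaar; infer_instance

-- ===== CLAIM (what is proved, stated in full; the proofs are below) =====
def Claim_equal_is_valid_aadhaar : Prop := ∀ (aadhaar_raw : Option String), Dom_is_valid_aadhaar aadhaar_raw → Spec_is_valid_aadhaar aadhaar_raw (is_valid_aadhaar aadhaar_raw)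

-- ===== LEMMAS AND PROOFS =====

-- proof-side abbreviations: the d-table as a binary operation and the p-table element at (j, d)
def pvM (a b : Nat) : Nat := (pvDTable.getD a []).getD b 0
def pvElem (j d : Nat) : Nat := (pvPTable.getD (j % 8) []).getD d 0

-- the right-associated product A computes over a reversed digit list starting at index n
def pvProdR : List Char → Nat → Nat
  | [], _ => 0
  | x :: xs, n => pvM (pvElem n (x.toNat - 48)) (pvProdR xs (n + 1))

-- the product B computes over the forward digit list starting at forward index i
def pvQ : List Char → Nat → Nat
  | [], _ => 0
  | x :: xs, i => pvM (pvQ xs (i + 1)) (pvElem (11 - i) (x.toNat - 48))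

-- decoded-state reading: the D5 element (as d-table index 0..9) a (refl, rot) state denotes
def pvEnc (st : Bool × Int) : Nat := if st.1 then 5 + st.2.toNat % 5 else st.2.toNat % 5

-- B's step once the row entry is decoded
def pvApply (e : Nat) (st : Bool × Int) : Bool × Int :=
  if 5 ≤ e then (!st.1, PySem.Int.mod (((e % 5 : Nat) : Int) - st.2) 5)
  else (st.1, PySem.Int.mod (((e % 5 : Nat) : Int) + st.2) 5)

-- finite facts about the tables
theorem pvM_lt : ∀ a < 10, ∀ b < 10, pvM a b < 10 := by decide
theorem pvM_assoc : ∀ a < 10, ∀ b < 10, ∀ c < 10, pvM (pvM a b) c = pvM a (pvM b c) := by decide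
theorem pvM_zero_left : ∀ a < 10, pvM 0 a = a := by decide
theorem pvM_zero_right : ∀ a < 10, pvM a 0 = a := by decide
theorem pvElem_lt_aux : ∀ j < 8, ∀ d < 10, (pvPTable.getD j []).getD d 0 < 10 := by decide
theorem pv_rows_decode : ∀ j < 8, ∀ d < 10,
    (pvRows.getD j []).getD d (false, 0)
      = (decide (5 ≤ (pvPTable.getD j []).getD d 0), (pvPTable.getD j []).getD d 0 % 5) := by decide
theorem pv_apply_spec : ∀ (e : Nat), e < 10 → ∀ (ρ : Nat), ρ < 5 → ∀ b : Bool,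
    pvEnc (pvApply e (b, (ρ : Int))) = pvM e (pvEnc (b, (ρ : Int)))
    ∧ 0 ≤ (pvApply e (b, (ρ : Int))).2 ∧ (pvApply e (b, (ρ : Int))).2 < 5 := by decide

theorem pvElem_lt (j d : Nat) (hd : d < 10) : pvElem j d < 10 :=
  pvElem_lt_aux (j % 8) (Nat.mod_lt _ (by omega)) d hd

-- ASCII bounds of a character the filter kept
theorem pv_digit_bounds (c : Char) (h : PySem.Chars.isdigit c = true) : 48 ≤ c.toNat ∧ c.toNat ≤ 57 := by
  simp only [PySem.Chars.isdigit, Bool.and_eq_true, decide_eq_true_eq] at h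
  obtain ⟨h1, h2⟩ := h
  rw [Char.le_def] at h1 h2
  have t1 := UInt32.le_iff_toNat_le.mp h1
  have t2 := UInt32.le_iff_toNat_le.mp h2
  have e1 : (('0' : Char).val).toNat = 48 := rfl
  have e2 : (('9' : Char).val).toNat = 57 := rfl
  simp only [Char.toNat]
  omega

theorem pvProdR_lt (l : List Char) (hd : ∀ ch ∈ l, 48 ≤ ch.toNat ∧ ch.toNat ≤ 57) (n : Nat) :
    pvProdR l n < 10 := by
  induction l generalizing n with
  | nil => simp [pvProdR]
  | cons x xs ih =>
    obtain ⟨h1, h2⟩ := hd x (List.mem_cons_self ..)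
    exact pvM_lt _ (pvElem_lt n _ (by omega)) _
      (ih (fun ch h => hd ch (List.mem_cons_of_mem _ h)) (n + 1))

theorem pvQ_lt (l : List Char) (hd : ∀ ch ∈ l, 48 ≤ ch.toNat ∧ ch.toNat ≤ 57) (i : Nat) :
    pvQ l i < 10 := by
  induction l generalizing i with
  | nil => simp [pvQ]
  | cons x xs ih =>
    obtain ⟨h1, h2⟩ := hd x (List.mem_cons_self ..)
    exact pvM_lt _ (ih (fun ch h => hd ch (List.mem_cons_of_mem _ h)) (i + 1)) _
      (pvElem_lt (11 - i) _ (by omega))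

theorem pvEnc_lt (st : Bool × Int) : pvEnc st < 10 := by
  unfold pvEnc; split <;> omega

-- A's step at index n is the d-table product with the p-table element
theorem pv_stepA_eq (c n : Nat) (x : Char) :
    pvStepA c ((n : Int), x) = pvM c (pvElem n (x.toNat - 48)) := by
  have hmod : PySem.Int.mod ((n : Int)) 8 = ((n % 8 : Nat) : Int) := by
    exact_mod_cast PySem.Int.mod_natCast n 8
  simp only [pvStepA, pvM, pvElem, hmod, Int.toNat_natCast]

-- A's fold equals c multiplied by the right-associated product
theorem pv_afold (l : List Char) (hd : ∀ ch ∈ l, 48 ≤ ch.toNat ∧ ch.toNat ≤ 57) :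
    ∀ (n c : Nat), c < 10 →
      (PySem.List.enumerate l (n : Int)).foldl pvStepA c = pvM c (pvProdR l n) := by
  induction l with
  | nil =>
    intro n c hc
    simp [PySem.List.enumerate_nil, pvProdR, pvM_zero_right c hc]
  | cons x xs ih =>
    intro n c hc
    obtain ⟨h1, h2⟩ := hd x (List.mem_cons_self ..)
    have he : pvElem n (x.toNat - 48) < 10 := pvElem_lt n _ (by omega)
    have hcast : ((n : Int)) + 1 = (((n + 1 : Nat)) : Int) := by push_cast; ring
    rw [PySem.List.enumerate_cons, List.foldl_cons, pv_stepA_eq, hcast,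
      ih (fun ch h => hd ch (List.mem_cons_of_mem _ h)) (n + 1) _ (pvM_lt c hc _ he),
      pvM_assoc c hc _ he _ (pvProdR_lt xs (fun ch h => hd ch (List.mem_cons_of_mem _ h)) (n + 1))]
    rfl

-- pvProdR over an append splits as a product
theorem pv_prodR_append (l1 l2 : List Char)
    (hd1 : ∀ ch ∈ l1, 48 ≤ ch.toNat ∧ ch.toNat ≤ 57)
    (hd2 : ∀ ch ∈ l2, 48 ≤ ch.toNat ∧ ch.toNat ≤ 57) (n : Nat) :
    pvProdR (l1 ++ l2) n = pvM (pvProdR l1 n) (pvProdR l2 (n + l1.length)) := by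
  induction l1 generalizing n with
  | nil => simp [pvProdR, pvM_zero_left _ (pvProdR_lt l2 hd2 n)]
  | cons x xs ih =>
    obtain ⟨h1, h2⟩ := hd1 x (List.mem_cons_self ..)
    have hxs : ∀ ch ∈ xs, 48 ≤ ch.toNat ∧ ch.toNat ≤ 57 :=
      fun ch h => hd1 ch (List.mem_cons_of_mem _ h)
    have he : pvElem n (x.toNat - 48) < 10 := pvElem_lt n _ (by omega)
    simp only [List.cons_append, pvProdR, List.length_cons]
    rw [ih hxs (n + 1), ← pvM_assoc _ he _ (pvProdR_lt xs hxs (n + 1)) _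
      (pvProdR_lt l2 hd2 (n + 1 + xs.length))]
    have : n + 1 + xs.length = n + (xs.length + 1) := by omega
    rw [this]

-- the reversed product A needs equals the forward product B needs when the indices line up
theorem pv_prodR_reverse (ds : List Char) (hd : ∀ ch ∈ ds, 48 ≤ ch.toNat ∧ ch.toNat ≤ 57) :
    ∀ (n i : Nat), n + ds.length + i = 12 → pvProdR ds.reverse n = pvQ ds i := by
  induction ds with
  | nil => intro n i _; simp [pvProdR, pvQ]
  | cons x xs ih =>
    intro n i h
    obtain ⟨h1, h2⟩ := hd x (List.mem_cons_self ..)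
    have hxs : ∀ ch ∈ xs, 48 ≤ ch.toNat ∧ ch.toNat ≤ 57 :=
      fun ch hm => hd ch (List.mem_cons_of_mem _ hm)
    have hrev : ∀ ch ∈ xs.reverse, 48 ≤ ch.toNat ∧ ch.toNat ≤ 57 := by
      intro ch hm; exact hxs ch (List.mem_reverse.mp hm)
    have he : pvElem (n + xs.length) (x.toNat - 48) < 10 :=
      pvElem_lt _ _ (by omega)
    rw [List.reverse_cons, pv_prodR_append xs.reverse [x] hrev
      (by intro ch hm; simp at hm; subst hm; exact ⟨h1, h2⟩) n,
      List.length_reverse]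
    simp only [pvProdR]
    rw [pvM_zero_right _ he, ih hxs n (i + 1) (by simp at h ⊢; omega)]
    have hidx : n + xs.length = 11 - i := by simp at h; omega
    rw [hidx]
    rfl

-- B's raw step is pvApply of the decoded table element
theorem pv_step_eq (i : Nat) (hi : i ≤ 11) (x : Char)
    (hx : 48 ≤ x.toNat ∧ x.toNat ≤ 57) (st : Bool × Int) :
    pvBStep st ((i : Int), x) = pvApply (pvElem (11 - i) (x.toNat - 48)) st := by
  have hsub : (11 : Int) - (i : Int) = ((11 - i : Nat) : Int) := by omega
  have hmod : PySem.Int.mod ((11 : Int) - (i : Int)) 8 = (((11 - i) % 8 : Nat) : Int) := by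
    rw [hsub]; exact_mod_cast PySem.Int.mod_natCast (11 - i) 8
  have hrow := pv_rows_decode ((11 - i) % 8) (Nat.mod_lt _ (by omega)) (x.toNat - 48) (by omega)
  simp only [pvBStep, hmod, Int.toNat_natCast, hrow, pvApply, pvElem]
  by_cases h : 5 ≤ (pvPTable.getD ((11 - i) % 8) []).getD (x.toNat - 48) 0 <;> simp [h]

-- pvApply multiplies the decoded state on the left and keeps rot in [0, 5)
theorem pv_apply_spec' (e : Nat) (he : e < 10) (st : Bool × Int) (h0 : 0 ≤ st.2) (h5 : st.2 < 5) :
    pvEnc (pvApply e st) = pvM e (pvEnc st)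
    ∧ 0 ≤ (pvApply e st).2 ∧ (pvApply e st).2 < 5 := by
  have hρ : st.2.toNat < 5 := by omega
  have h := pv_apply_spec e he st.2.toNat hρ st.1
  rwa [Int.toNat_of_nonneg h0, Prod.mk.eta] at h

-- B's fold computes (in coordinates) the forward product left-multiplied into the state
theorem pv_bfold (ds : List Char) (hd : ∀ ch ∈ ds, 48 ≤ ch.toNat ∧ ch.toNat ≤ 57) :
    ∀ (i : Nat) (st : Bool × Int), i + ds.length ≤ 12 → 0 ≤ st.2 → st.2 < 5 →
      pvEnc ((PySem.List.enumerate ds (i : Int)).foldl pvBStep st) = pvM (pvQ ds i) (pvEnc st)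
      ∧ 0 ≤ ((PySem.List.enumerate ds (i : Int)).foldl pvBStep st).2
      ∧ ((PySem.List.enumerate ds (i : Int)).foldl pvBStep st).2 < 5 := by
  induction ds with
  | nil =>
    intro i st _ h0 h5
    simp [PySem.List.enumerate_nil, pvQ, pvM_zero_left _ (pvEnc_lt st), h0, h5]
  | cons x xs ih =>
    intro i st hlen h0 h5
    obtain ⟨h1, h2⟩ := hd x (List.mem_cons_self ..)
    have hxs : ∀ ch ∈ xs, 48 ≤ ch.toNat ∧ ch.toNat ≤ 57 :=
      fun ch hm => hd ch (List.mem_cons_of_mem _ hm)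
    have hi : i ≤ 11 := by simp at hlen; omega
    have he : pvElem (11 - i) (x.toNat - 48) < 10 := pvElem_lt _ _ (by omega)
    have happ := pv_apply_spec' _ he st h0 h5
    have hcast : ((i : Int)) + 1 = (((i + 1 : Nat)) : Int) := by push_cast; ring
    rw [PySem.List.enumerate_cons, List.foldl_cons, pv_step_eq i hi x ⟨h1, h2⟩ st, hcast]
    have hih := ih hxs (i + 1) (pvApply (pvElem (11 - i) (x.toNat - 48)) st)
      (by simp at hlen ⊢; omega) happ.2.1 happ.2.2
    refine ⟨?_, hih.2⟩
    rw [hih.1, happ.1, ← pvM_assoc _ (pvQ_lt xs hxs (i + 1)) _ he _ (pvEnc_lt st)]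
    rfl

-- the final boolean test agrees with testing the encoded state against 0
theorem pv_enc_zero (st : Bool × Int) (h0 : 0 ≤ st.2) (h5 : st.2 < 5) :
    decide (pvEnc st = 0) = (!st.1 && decide (st.2 = 0)) := by
  obtain ⟨b, ρ⟩ := st
  cases b <;> simp [pvEnc] at h0 h5 ⊢ <;> omega

-- ===== VERDICT (by name: the statement is the Claim_ definition above) =====
theorem is_valid_aadhaar_spec : Claim_equal_is_valid_aadhaar := by
  intro aadhaar_raw _
  unfold Spec_is_valid_aadhaar is_valid_aadhaar is_valid_aadhaar_alt
  by_cases hlen : (clean_aadhaar aadhaar_raw).toList.length ≠ 12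
  · rw [if_pos hlen, if_pos hlen]
  · rw [if_neg hlen, if_neg hlen]
    rw [not_ne_iff] at hlen
    have hdnum : ∀ ch ∈ (clean_aadhaar aadhaar_raw).toList, 48 ≤ ch.toNat ∧ ch.toNat ≤ 57 := by
      intro ch hch
      have hm : ch ∈ ((aadhaar_raw.getD "").toList).filter PySem.Chars.isdigit := by
        simpa [clean_aadhaar] using hch
      exact pv_digit_bounds ch (List.mem_filter.mp hm).2
    have hdrev : ∀ ch ∈ (clean_aadhaar aadhaar_raw).toList.reverse, 48 ≤ ch.toNat ∧ ch.toNat ≤ 57 :=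
      fun ch hch => hdnum ch (List.mem_reverse.mp hch)
    have hA : (PySem.List.enumerate (clean_aadhaar aadhaar_raw).toList.reverse 0).foldl pvStepA 0
        = pvQ (clean_aadhaar aadhaar_raw).toList 0 := by
      have h1 := pv_afold _ hdrev 0 0 (by omega)
      have h2 := pv_prodR_reverse _ hdnum 0 0 (by simpa using hlen)
      simp only [Nat.cast_zero] at h1
      rw [h1, pvM_zero_left _ (pvProdR_lt _ hdrev 0), h2]
    have hB := pv_bfold _ hdnum 0 ((false, 0) : Bool × Int) (by omega) (by omega) (by omega)
    simp only [Nat.cast_zero] at hB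
    obtain ⟨hBe, hB0, hB5⟩ := hB
    have henc0 : pvEnc ((false, 0) : Bool × Int) = 0 := rfl
    rw [henc0, pvM_zero_right _ (pvQ_lt _ hdnum 0)] at hBe
    rw [hA, ← hBe]
    exact pv_enc_zero _ hB0 hB5
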